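-- pv_equiv track=rewrite | github.com/davidkon/ui_automator | android_auto_script_generator.py | _build_selector_string
-- ===== SOURCE A (Python) =====
-- def _build_selector_string(selector_dict):
--     """
--     Builds a uiautomator2 selector string from a dictionary.
--     Example: {'resourceId': 'com.id', 'text': 'Next'} -> 'resourceId="com.id", text="Next"'
--     """
--     if not selector_dict:
--         return ""
--
--     parts = []
--     # Prioritize keys for a somewhat consistent order, though uiautomator2 is flexible
--     preferred_keys = ['resourceId', 'text', 'description', 'className']
--
--     processed_keys = set()
--
--     for key in preferred_keys:
--         if key in selector_dict and selector_dict[key]: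
--             parts.append(f"{key}={repr(selector_dict[key])}")
--             processed_keys.add(key)
--
--     # Add any other keys that might have been included (e.g. instance, if ever used)
--     for key, value in selector_dict.items():
--         if key not in processed_keys and value:
--             parts.append(f"{key}={repr(value)}")
--
--     return ", ".join(parts)
-- ===== SOURCE B (Python) =====
-- def _build_selector_string(selector_dict):
--     preferred = ['resourceId', 'text', 'description', 'className']
--     buckets = [[] for _ in range(len(preferred) + 1)]
--     for key, value in selector_dict.items():
--         if value:
--             i = preferred.index(key) if key in preferred else len(preferred)
--             buckets[i].append(f"{key}={repr(value)}")
--     return ", ".join(part for bucket in buckets for part in bucket)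
-- ===== Notes on version B (the rewrite author's own statement) =====
-- stated objective: alternative
-- what changed: A's two passes (a loop over the four preferred keys using dict lookups plus a processed_keys set, then a second loop over the remaining items) are replaced by a single bucket-sort pass that distributes each truthy item into one of five priority buckets and concatenates the buckets.
import Mathlib
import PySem

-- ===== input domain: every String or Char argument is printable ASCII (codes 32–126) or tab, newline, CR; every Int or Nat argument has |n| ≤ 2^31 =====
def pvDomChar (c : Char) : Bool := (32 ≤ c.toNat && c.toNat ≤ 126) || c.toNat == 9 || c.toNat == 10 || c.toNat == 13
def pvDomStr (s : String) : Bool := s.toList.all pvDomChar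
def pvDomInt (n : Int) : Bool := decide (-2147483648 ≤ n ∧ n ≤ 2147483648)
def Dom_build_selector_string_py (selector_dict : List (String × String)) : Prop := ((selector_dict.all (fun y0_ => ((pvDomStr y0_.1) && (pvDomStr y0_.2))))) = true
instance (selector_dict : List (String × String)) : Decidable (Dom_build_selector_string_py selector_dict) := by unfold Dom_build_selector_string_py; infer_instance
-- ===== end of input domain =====

-- B replaces A's two passes (preferred-key loop with a processed set, then a second loop over the
-- items) by a single bucket-sort pass distributing the items into 5 priority buckets; same return
-- value (objective: alternative decomposition, not claimed faster).

-- ===== PORT A =====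
-- shared primitive: Python's repr() of a str, exact on the Dom alphabet (printable ASCII + tab/newline/CR)
def pyReprChar (q c : Char) : List Char :=
  if c = '\\' then ['\\', '\\']
  else if c = q then ['\\', q]
  else if c = '\t' then ['\\', 't']
  else if c = '\n' then ['\\', 'n']
  else if c = '\r' then ['\\', 'r']
  else [c]

def pyReprStr (v : String) : List Char :=
  let cs := v.toList
  let q : Char := if '\'' ∈ cs ∧ '"' ∉ cs then '"' else '\''
  q :: (cs.flatMap (pyReprChar q) ++ [q])

-- f"{key}={repr(value)}"
def selPart (k v : String) : String := String.ofList (k.toList ++ '=' :: pyReprStr v)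

-- selector_dict[key] / 'key in selector_dict' on the association list (first match; unique keys under Pre_)
def selLookup? (sd : List (String × String)) (k : String) : Option String :=
  (sd.find? (fun kv => kv.1 == k)).map (·.2)

def preferredKeys : List String := ["resourceId", "text", "description", "className"]

def build_selector_string_py (selector_dict : List (String × String)) : String :=
  if selector_dict = [] then "" else
  let st := preferredKeys.foldl
    (fun (st : List String × PySem.Set String) key =>
      match selLookup? selector_dict key with
      | some v => if v ≠ "" then (st.1 ++ [selPart key v], PySem.Set.add st.2 key) else st
      | none => st)
    ([], PySem.Set.empty)
  let parts := selector_dict.foldl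
    (fun ps kv =>
      if PySem.Set.contains st.2 kv.1 = false ∧ kv.2 ≠ "" then ps ++ [selPart kv.1 kv.2] else ps)
    st.1
  PySem.Str.join ", " parts

-- ===== PORT B =====
-- preferred.index(key) if key in preferred else len(preferred)
def selPri (k : String) : Nat :=
  match PySem.List.index? preferredKeys k with
  | some j => j
  | none => preferredKeys.length

def build_selector_string_py_alt (selector_dict : List (String × String)) : String :=
  let buckets : List (List String) := List.replicate (preferredKeys.length + 1) []
  let buckets := selector_dict.foldl
    (fun bs kv =>
      if kv.2 ≠ "" then
        let i := selPri kv.1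
        bs.set i (bs.getD i [] ++ [selPart kv.1 kv.2])
      else bs)
    buckets
  PySem.Str.join ", " buckets.flatten

-- ===== PRECONDITION & SPEC =====
-- Pre_ excludes association lists with duplicate keys: they do not arise from a Python dict
-- (dict construction collapses duplicates), so either behaviour there is an artefact of the encoding.
def Pre_build_selector_string_py (selector_dict : List (String × String)) : Prop :=
  (selector_dict.map Prod.fst).Nodup
instance (selector_dict : List (String × String)) : Decidable (Pre_build_selector_string_py selector_dict) := by unfold Pre_build_selector_string_py; infer_instance

def pvWitness_build_selector_string_py : (List (String × String)) :=
  [("text", "Next"), ("instance", "1"), ("resourceId", "com.id")]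

def Spec_build_selector_string_py (selector_dict : List (String × String)) (out : String) : Prop := out = build_selector_string_py_alt selector_dict
instance (selector_dict : List (String × String)) (out : String) : Decidable (Spec_build_selector_string_py selector_dict out) := by unfold Spec_build_selector_string_py; infer_instance

-- ===== CLAIM (what is proved, stated in full; the proofs are below) =====
def Claim_equal_build_selector_string_py : Prop := ∀ (selector_dict : List (String × String)), Dom_build_selector_string_py selector_dict → Pre_build_selector_string_py selector_dict → Spec_build_selector_string_py selector_dict (build_selector_string_py selector_dict)

-- ===== LEMMAS AND PROOFS =====

-- helper predicate: 'key in selector_dict and selector_dict[key]' (key present with truthy value)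
def selTruthy (sd : List (String × String)) (k : String) : Bool :=
  match selLookup? sd k with
  | some v => !(v == "")
  | none => false

lemma selPri_eq (k : String) : selPri k =
    if k = "resourceId" then 0 else if k = "text" then 1 else if k = "description" then 2
    else if k = "className" then 3 else 4 := by
  by_cases h1 : k = "resourceId"
  · subst h1; decide
  by_cases h2 : k = "text"
  · subst h2; decide
  by_cases h3 : k = "description"
  · subst h3; decide
  by_cases h4 : k = "className"
  · subst h4; decide
  simp [selPri, preferredKeys, PySem.List.index?_eq_idxOf?, List.idxOf?, List.findIdx?_cons,
    h1, h2, h3, h4, Ne.symm h1, Ne.symm h2, Ne.symm h3, Ne.symm h4]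

lemma A_fold (sd : List (String × String)) (P : List String) (ps : List String)
    (s : PySem.Set String) :
    P.foldl (fun (st : List String × PySem.Set String) key =>
        match selLookup? sd key with
        | some v => if v ≠ "" then (st.1 ++ [selPart key v], PySem.Set.add st.2 key) else st
        | none => st) (ps, s)
    = (ps ++ (P.filter (selTruthy sd)).map (fun k => selPart k ((selLookup? sd k).getD "")),
       (P.filter (selTruthy sd)).foldl (fun s k => PySem.Set.add s k) s) := by
  induction P generalizing ps s with
  | nil => simp
  | cons k t ih =>
    cases h : selLookup? sd k with
    | none =>
      rw [List.foldl_cons, h]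
      refine (ih ps s).trans ?_
      simp [selTruthy, h]
    | some v =>
      by_cases hv : v = ""
      · subst hv
        rw [List.foldl_cons, h]
        refine (ih ps s).trans ?_
        simp [selTruthy, h]
      · simp only [List.foldl_cons, h]
        rw [if_pos hv]
        refine (ih (ps ++ [selPart k v]) (PySem.Set.add s k)).trans ?_
        simp [selTruthy, h, hv]


-- bucket i of B's single pass: the (truthy) items of priority i, in order
def selG (i : Nat) (l : List (String × String)) : List String :=
  (l.filter (fun kv => !(kv.2 == "") && selPri kv.1 == i)).map (fun kv => selPart kv.1 kv.2)

lemma selPri_cases (k : String) :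
    selPri k = 0 ∨ selPri k = 1 ∨ selPri k = 2 ∨ selPri k = 3 ∨ selPri k = 4 := by
  rw [selPri_eq]; split_ifs <;> simp

lemma B_fold (l : List (String × String)) (b0 b1 b2 b3 b4 : List String) :
    l.foldl (fun (bs : List (List String)) kv =>
        if kv.2 ≠ "" then
          bs.set (selPri kv.1) (bs.getD (selPri kv.1) [] ++ [selPart kv.1 kv.2])
        else bs) [b0, b1, b2, b3, b4]
    = [b0 ++ selG 0 l, b1 ++ selG 1 l, b2 ++ selG 2 l, b3 ++ selG 3 l, b4 ++ selG 4 l] := by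
  induction l generalizing b0 b1 b2 b3 b4 with
  | nil => simp [selG]
  | cons kv t ih =>
    rw [List.foldl_cons]
    by_cases hv : kv.2 = ""
    · rw [if_neg (by simp [hv])]
      rw [ih]
      simp [selG, hv]
    · rw [if_pos hv]
      have hfin : ∀ b0' b1' b2' b3' b4',
          List.foldl (fun (bs : List (List String)) kv =>
            if kv.2 ≠ "" then
              bs.set (selPri kv.1) (bs.getD (selPri kv.1) [] ++ [selPart kv.1 kv.2])
            else bs) [b0', b1', b2', b3', b4'] t
          = [b0' ++ selG 0 t, b1' ++ selG 1 t, b2' ++ selG 2 t, b3' ++ selG 3 t, b4' ++ selG 4 t] :=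
        ih
      rcases selPri_cases kv.1 with hp | hp | hp | hp | hp
      · rw [hp]
        refine (hfin (b0 ++ [selPart kv.1 kv.2]) b1 b2 b3 b4).trans ?_
        simp [selG, hv, hp]
      · rw [hp]
        refine (hfin b0 (b1 ++ [selPart kv.1 kv.2]) b2 b3 b4).trans ?_
        simp [selG, hv, hp]
      · rw [hp]
        refine (hfin b0 b1 (b2 ++ [selPart kv.1 kv.2]) b3 b4).trans ?_
        simp [selG, hv, hp]
      · rw [hp]
        refine (hfin b0 b1 b2 (b3 ++ [selPart kv.1 kv.2]) b4).trans ?_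
        simp [selG, hv, hp]
      · rw [hp]
        refine (hfin b0 b1 b2 b3 (b4 ++ [selPart kv.1 kv.2])).trans ?_
        simp [selG, hv, hp]


lemma key_filter (sd : List (String × String)) (h : (sd.map Prod.fst).Nodup) (c : String) :
    sd.filter (fun kv => kv.1 == c)
    = (match selLookup? sd c with | some v => [(c, v)] | none => []) := by
  induction sd with
  | nil => simp [selLookup?]
  | cons kv t ih =>
    simp only [List.map_cons, List.nodup_cons] at h
    by_cases hk : kv.1 = c
    · subst hk
      have ht : t.filter (fun kv' => kv'.1 == kv.1) = [] := by
        rw [List.filter_eq_nil_iff]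
        intro kv' hm
        have : kv'.1 ∈ t.map Prod.fst := List.mem_map_of_mem hm
        simp only [beq_iff_eq]
        intro hc
        exact h.1 (hc ▸ this)
      simp [selLookup?, ht]
    · simp only [List.filter_cons]
      have : selLookup? (kv :: t) c = selLookup? t c := by
        simp [selLookup?, hk]
      rw [this]
      simp only [beq_iff_eq, hk]
      simpa using ih h.2

lemma selLookup?_of_mem {sd : List (String × String)} (h : (sd.map Prod.fst).Nodup)
    {kv : String × String} (hm : kv ∈ sd) : selLookup? sd kv.1 = some kv.2 := by
  induction sd with
  | nil => cases hm
  | cons x t ih =>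
    simp only [List.map_cons, List.nodup_cons] at h
    rcases List.mem_cons.mp hm with rfl | hm'
    · simp [selLookup?]
    · have hx : (x.1 == kv.1) = false := by
        simp only [beq_eq_false_iff_ne, ne_eq]
        intro he
        exact h.1 (he ▸ List.mem_map_of_mem hm')
      have := ih h.2 hm'
      simpa [selLookup?, hx] using this

lemma selG_pref (sd : List (String × String)) (h : (sd.map Prod.fst).Nodup) (c : String) :
    (sd.filter (fun kv => !(kv.2 == "") && kv.1 == c)).map (fun kv => selPart kv.1 kv.2)
    = if selTruthy sd c then [selPart c ((selLookup? sd c).getD "")] else [] := by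
  rw [← List.filter_filter, key_filter sd h c]
  cases hl : selLookup? sd c with
  | none => simp [selTruthy, hl]
  | some v =>
    by_cases hv : v = "" <;> simp [selTruthy, hl, hv]

lemma selPri_eq_four_iff (k : String) : selPri k = 4 ↔ k ∉ preferredKeys := by
  rw [selPri_eq]
  by_cases h1 : k = "resourceId"
  · simp [h1, preferredKeys]
  by_cases h2 : k = "text"
  · simp [h2, preferredKeys]
  by_cases h3 : k = "description"
  · simp [h3, preferredKeys]
  by_cases h4 : k = "className"
  · simp [h4, preferredKeys]
  simp [h1, h2, h3, h4, preferredKeys]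

lemma selG_key (sd : List (String × String)) (i : Nat) (c : String)
    (hic : ∀ k : String, selPri k = i ↔ k = c) :
    selG i sd = (sd.filter (fun kv => !(kv.2 == "") && kv.1 == c)).map (fun kv => selPart kv.1 kv.2) := by
  unfold selG
  congr 1
  apply List.filter_congr
  intro kv _
  have : (selPri kv.1 == i) = (kv.1 == c) := by
    by_cases hk : kv.1 = c
    · simp [hk, (hic c).mpr rfl]
    · have : ¬ selPri kv.1 = i := fun he => hk ((hic kv.1).mp he)
      simp [hk, this]
  rw [this]

lemma pri_zero (k : String) : selPri k = 0 ↔ k = "resourceId" := by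
  rw [selPri_eq]; split_ifs <;> simp_all
lemma pri_one (k : String) : selPri k = 1 ↔ k = "text" := by
  rw [selPri_eq]; split_ifs <;> simp_all
lemma pri_two (k : String) : selPri k = 2 ↔ k = "description" := by
  rw [selPri_eq]; split_ifs <;> simp_all
lemma pri_three (k : String) : selPri k = 3 ↔ k = "className" := by
  rw [selPri_eq]; split_ifs <;> simp_all

lemma rest_cond (sd : List (String × String)) (hpre : (sd.map Prod.fst).Nodup) :
    sd.filter (fun kv => decide ((PySem.Set.contains
        ((preferredKeys.filter (selTruthy sd)).foldl (fun s k => PySem.Set.add s k) PySem.Set.empty)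
        kv.1 = false) ∧ kv.2 ≠ ""))
    = sd.filter (fun kv => !(kv.2 == "") && selPri kv.1 == 4) := by
  apply List.filter_congr
  intro kv hm
  have hlk := selLookup?_of_mem hpre hm
  by_cases hv : kv.2 = ""
  · simp [hv]
  · have hproc : (preferredKeys.filter (selTruthy sd)).foldl (fun s k => PySem.Set.add s k)
        PySem.Set.empty = PySem.Set.ofList (preferredKeys.filter (selTruthy sd)) := rfl
    have ht : selTruthy sd kv.1 = true := by simp [selTruthy, hlk, hv]
    by_cases hp : kv.1 ∈ preferredKeys
    · have h4 : ¬ selPri kv.1 = 4 := fun he => (selPri_eq_four_iff kv.1).mp he hp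
      simp only [hproc]
      simp [PySem.Set.mem_ofList, List.mem_filter, ht, hp, h4, hv]
    · have h4 : selPri kv.1 = 4 := (selPri_eq_four_iff kv.1).mpr hp
      simp only [hproc]
      simp [PySem.Set.mem_ofList, List.mem_filter, ht, hp, h4, hv]

lemma pref_part (sd : List (String × String)) (hpre : (sd.map Prod.fst).Nodup) :
    (preferredKeys.filter (selTruthy sd)).map (fun k => selPart k ((selLookup? sd k).getD ""))
    = selG 0 sd ++ selG 1 sd ++ selG 2 sd ++ selG 3 sd := by
  rw [selG_key sd 0 "resourceId" pri_zero, selG_key sd 1 "text" pri_one,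
    selG_key sd 2 "description" pri_two, selG_key sd 3 "className" pri_three]
  rw [selG_pref sd hpre "resourceId", selG_pref sd hpre "text",
    selG_pref sd hpre "description", selG_pref sd hpre "className"]
  simp only [preferredKeys, List.filter_cons, List.filter_nil]
  split_ifs <;> simp_all

-- ===== VERDICT (by name: the statement is the Claim_ definition above) =====
theorem build_selector_string_py_spec : Claim_equal_build_selector_string_py := by
  unfold Claim_equal_build_selector_string_py
  intro sd _ hpre
  unfold Pre_build_selector_string_py at hpre
  unfold Spec_build_selector_string_py
  by_cases hnil : sd = []
  · subst hnil; rfl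
  · unfold build_selector_string_py build_selector_string_py_alt
    rw [if_neg hnil]
    simp only []
    rw [A_fold sd preferredKeys [] PySem.Set.empty]
    rw [PySem.List.foldl_append_ite
      (p := fun kv : String × String => PySem.Set.contains
        ((preferredKeys.filter (selTruthy sd)).foldl (fun s k => PySem.Set.add s k) PySem.Set.empty)
        kv.1 = false ∧ kv.2 ≠ "")
      (f := fun kv : String × String => selPart kv.1 kv.2)]
    rw [rest_cond sd hpre]
    have hrep : List.replicate (preferredKeys.length + 1) ([] : List String)
        = [[], [], [], [], []] := rfl
    rw [hrep, B_fold sd [] [] [] [] []]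
    rw [List.flatten]
    simp only [List.flatten, List.nil_append]
    rw [pref_part sd hpre]
    simp [selG, List.append_assoc]
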